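-- pv_equiv track=rewrite | github.com/GabrielMaiaRamos/Lista-Prog | Lista-Prog-4.py | maior_sequencia
-- ===== SOURCE A (Python) =====
-- def maior_sequencia(L):
--     maior = 1
--     count = 1
--     for c in range(len(L)-1):
--         if L[c]<L[c+1]:
--             count+=1
--             if count > maior:
--                 maior = count
--         else:
--             count = 1
--     return maior
-- ===== SOURCE B (Python) =====
-- def maior_sequencia(L):
--     n = len(L)
--     bounds = [0] + [i for i, (p, c) in enumerate(zip(L, L[1:]), 1) if p >= c] + [n]
--     return max(max(b - a for a, b in zip(bounds, bounds[1:])), 1)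
-- ===== Notes on version B (the rewrite author's own statement) =====
-- stated objective: alternative
-- what changed: B computes the list of break positions (indices i with L[i-1] >= L[i]), brackets it with 0 and len(L), and returns the maximum gap between consecutive break positions, instead of A's fused scan maintaining a running run-length counter and a running maximum.
import Mathlib
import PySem

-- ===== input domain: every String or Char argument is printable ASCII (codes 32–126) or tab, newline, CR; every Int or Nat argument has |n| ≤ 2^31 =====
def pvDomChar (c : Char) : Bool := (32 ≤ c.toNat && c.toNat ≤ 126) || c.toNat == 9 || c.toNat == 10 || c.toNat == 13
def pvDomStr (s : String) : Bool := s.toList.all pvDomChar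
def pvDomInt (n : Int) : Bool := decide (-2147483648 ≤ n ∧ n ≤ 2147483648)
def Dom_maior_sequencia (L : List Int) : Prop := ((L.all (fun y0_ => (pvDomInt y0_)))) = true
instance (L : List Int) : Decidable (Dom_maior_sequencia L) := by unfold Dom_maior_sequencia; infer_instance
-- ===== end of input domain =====

-- B computes the break positions of the list and returns the maximum gap between consecutive
-- break positions (bracketed by 0 and len(L)), instead of A's fused run-length/maximum scan
-- (objective: alternative algorithm, same cost).

-- ===== PORT A =====
def maior_sequencia (L : List Int) : Int :=
  -- maior = 1; count = 1; for c in range(len(L)-1): …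
  let s := (PySem.List.pyRange 0 ((L.length : Int) - 1) 1).foldl
    (fun (s : Int × Int) c =>
      if PySem.List.pyGetD L c 0 < PySem.List.pyGetD L (c + 1) 0 then
        if s.2 + 1 > s.1 then (s.2 + 1, s.2 + 1) else (s.1, s.2 + 1)
      else (s.1, 1)) (1, 1)
  s.1

-- ===== PORT B =====
def maior_sequencia_alt (L : List Int) : Int :=
  -- n = len(L)
  -- bounds = [0] + [i for i, (p, c) in enumerate(zip(L, L[1:]), 1) if p >= c] + [n]
  -- return max(max(b - a for a, b in zip(bounds, bounds[1:])), 1)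
  let n : Int := L.length
  let bounds : List Int :=
    [0] ++ ((PySem.List.enumerate (L.zip (PySem.List.slice L (some 1) none)) 1).filter
              (fun p => decide (p.2.1 ≥ p.2.2))).map (·.1) ++ [n]
  let gaps : List Int :=
    (bounds.zip (PySem.List.slice bounds (some 1) none)).map (fun p => p.2 - p.1)
  -- bounds always has ≥ 2 elements, so gaps is nonempty and Python's max(gen) never raises;
  -- the getD default 0 is never used.
  max ((PySem.List.max? gaps (fun x => x)).getD 0) 1

-- ===== PRECONDITION & SPEC =====
def Spec_maior_sequencia (L : List Int) (out : Int) : Prop := out = maior_sequencia_alt L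
instance (L : List Int) (out : Int) : Decidable (Spec_maior_sequencia L out) := by
  unfold Spec_maior_sequencia; infer_instance

-- ===== CLAIM (what is proved, stated in full; the proofs are below) =====
def Claim_equal_maior_sequencia : Prop :=
  ∀ (L : List Int), Dom_maior_sequencia L → Spec_maior_sequencia L (maior_sequencia L)

-- ===== LEMMAS AND PROOFS =====

-- the list of increasing-run lengths of L (front to back); [] only for L = []
def pvRuns : List Int → List Int
  | [] => []
  | [_] => [1]
  | x :: y :: t =>
    match pvRuns (y :: t) with
    | [] => [1]          -- unreachable
    | h :: r => if x < y then (h + 1) :: r else 1 :: h :: r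

theorem pvRuns_cons (y : Int) (t : List Int) :
    ∃ h r, pvRuns (y :: t) = h :: r ∧ 1 ≤ h := by
  induction t generalizing y with
  | nil => exact ⟨1, [], rfl, le_rfl⟩
  | cons z t ih =>
    obtain ⟨h, r, hzr, h1⟩ := ih z
    by_cases hlt : y < z
    · exact ⟨h + 1, r, by simp [pvRuns, hzr, hlt], by omega⟩
    · exact ⟨1, h :: r, by simp [pvRuns, hzr, hlt], le_rfl⟩

-- A's index loop over range(len(L)-1), reading L[c] and L[c+1], is a fold over the adjacent pairs of L.
theorem pv_fold_adj {σ : Type} (g : σ → Int → Int → σ) :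
    ∀ (n : Nat) (L : List Int) (a : Nat), L.length - a = n → ∀ (s : σ),
      (PySem.List.pyRange (a : Int) ((L.length : Int) - 1) 1).foldl
        (fun s c => g s (PySem.List.pyGetD L c 0) (PySem.List.pyGetD L (c + 1) 0)) s
      = ((L.drop a).zip (L.drop (a + 1))).foldl (fun s p => g s p.1 p.2) s := by
  intro n
  induction n with
  | zero =>
    intro L a h s
    have ha : L.length ≤ a := by omega
    rw [PySem.List.pyRange_one_eq_nil (by omega)]
    rw [List.drop_eq_nil_of_le ha]
    simp
  | succ n ih =>
    intro L a h s
    by_cases hlt : a + 1 < L.length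
    · have h1 : (a : Int) < (L.length : Int) - 1 := by omega
      have hd1 : L.drop a = L[a] :: L.drop (a + 1) := List.drop_eq_getElem_cons (by omega)
      have hd2 : L.drop (a + 1) = L[a + 1] :: L.drop (a + 2) := List.drop_eq_getElem_cons hlt
      rw [PySem.List.pyRange_one_cons h1]
      simp only [List.foldl_cons]
      rw [show ((a : Int) + 1) = ((a + 1 : Nat) : Int) by omega]
      rw [PySem.List.pyGetD_natCast, PySem.List.pyGetD_natCast]
      rw [ih L (a + 1) (by omega)]
      have e1 : L.getD a 0 = L[a] := List.getD_eq_getElem L 0 (by omega)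
      have e2 : L.getD (a + 1) 0 = L[a + 1] := List.getD_eq_getElem L 0 hlt
      rw [e1, e2, hd1, hd2]
      simp only [List.zip_cons_cons, List.foldl_cons]
    · rw [PySem.List.pyRange_one_eq_nil (by omega)]
      rw [List.drop_eq_nil_of_le (show L.length ≤ a + 1 by omega)]
      simp

-- add d to the first element of a list
def pvAddFirst (d : Int) : List Int → List Int
  | [] => []
  | h :: r => (h + d) :: r

-- invariant of A's fused scan: its final maximum is the max of m and the run lengths,
-- the first run extended by the c-1 elements already consumed
theorem pv_A_inv : ∀ (t : List Int) (y : Int) (m c : Int), 1 ≤ c → c ≤ m →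
    (((y :: t).zip t).foldl
      (fun (s : Int × Int) p =>
        if p.1 < p.2 then
          if s.2 + 1 > s.1 then (s.2 + 1, s.2 + 1) else (s.1, s.2 + 1)
        else (s.1, 1)) (m, c)).1
    = (pvAddFirst (c - 1) (pvRuns (y :: t))).foldl max m := by
  intro t
  induction t with
  | nil =>
    intro y m c h1 h2
    simp only [pvRuns, pvAddFirst, List.zip_nil_right, List.foldl_nil, List.foldl_cons]
    omega
  | cons z t ih =>
    intro y m c h1 h2
    obtain ⟨h, r, hzr, hh1⟩ := pvRuns_cons z t
    simp only [List.zip_cons_cons, List.foldl_cons]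
    by_cases hlt : y < z
    · simp only [hlt, if_pos, pvRuns, hzr]
      have step : (if c + 1 > m then ((c + 1 : Int), (c + 1 : Int)) else (m, c + 1))
          = (max m (c + 1), c + 1) := by
        by_cases hb : c + 1 > m
        · simp [hb]; omega
        · simp [hb]; omega
      rw [step, ih z (max m (c + 1)) (c + 1) (by omega) (le_max_right _ _)]
      simp only [hzr, pvAddFirst, List.foldl_cons]
      congr 1
      omega
    · simp only [hlt, if_false, pvRuns, hzr]
      rw [ih z m 1 le_rfl (by omega)]
      simp only [hzr, pvAddFirst, List.foldl_cons]
      congr 1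
      omega

-- break positions: pvBreaksE a L lists a + k for each adjacent non-increase at offset k
def pvBreaksE (a : Int) : List Int → List Int
  | [] => []
  | [_] => []
  | x :: y :: t => (if x ≥ y then [a] else []) ++ pvBreaksE (a + 1) (y :: t)

-- B's filtered enumerate IS pvBreaksE
theorem pv_breaks_eq : ∀ (t : List Int) (y : Int) (a : Int),
    ((PySem.List.enumerate ((y :: t).zip t) a).filter (fun p => decide (p.2.1 ≥ p.2.2))).map (·.1)
      = pvBreaksE a (y :: t) := by
  intro t
  induction t with
  | nil => intro y a; simp [pvBreaksE, PySem.List.enumerate_nil]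
  | cons z t ih =>
    intro y a
    simp only [List.zip_cons_cons, PySem.List.enumerate_cons, pvBreaksE]
    by_cases h : y ≥ z
    · simp [h, ih z (a + 1)]
    · simp [h, ih z (a + 1)]

-- gaps between consecutive elements
def pvGaps : List Int → List Int
  | [] => []
  | [_] => []
  | a :: b :: r => (b - a) :: pvGaps (b :: r)

-- the gaps of the bracketed break-position list are exactly the run lengths
theorem pv_gaps_runs : ∀ (t : List Int) (y : Int) (a : Int),
    pvGaps (a :: pvBreaksE (a + 1) (y :: t) ++ [a + ((y :: t).length : Int)])
      = pvRuns (y :: t) := by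
  intro t
  induction t with
  | nil => intro y a; simp [pvBreaksE, pvGaps, pvRuns]
  | cons z t ih =>
    intro y a
    obtain ⟨h, r, hzr, _⟩ := pvRuns_cons z t
    have hlen : a + (((y :: z :: t).length : Nat) : Int)
        = (a + 1) + (((z :: t).length : Nat) : Int) := by simp; omega
    by_cases hge : y ≥ z
    · have : pvBreaksE (a + 1) (y :: z :: t) = (a + 1) :: pvBreaksE (a + 2) (z :: t) := by
        simp [pvBreaksE, hge]; ring_nf
      rw [this]
      have hrec := ih z (a + 1)
      rw [show (a + 1 + 1 : Int) = a + 2 by ring] at hrec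
      simp only [List.cons_append] at hrec ⊢
      simp only [pvGaps]
      rw [hlen]
      rw [show ((a:Int) + 1 - a) = 1 by ring]
      rw [hrec]
      simp [pvRuns, hzr, show ¬ (y < z) by omega]
    · have hb : pvBreaksE (a + 1) (y :: z :: t) = pvBreaksE (a + 2) (z :: t) := by
        simp [pvBreaksE, hge]; ring_nf
      rw [hb]
      have hrec := ih z (a + 1)
      rw [show (a + 1 + 1 : Int) = a + 2 by ring] at hrec
      rw [hlen] at *
      simp only [List.cons_append] at hrec ⊢
      -- compare pvGaps (a :: l) with pvGaps ((a+1) :: l) for the same nonempty l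
      cases hl : pvBreaksE (a + 2) (z :: t) ++ [(a + 1) + (((z :: t).length : Nat) : Int)] with
      | nil => exact absurd hl (by simp)
      | cons b l' =>
        rw [hl] at hrec
        simp only [pvGaps] at hrec ⊢
        rw [hzr] at hrec
        injection hrec with e1 e2
        simp only [pvRuns, hzr, show y < z by omega, if_pos]
        rw [e2, show b - a = h + 1 by omega]

-- B's gaps list written structurally
theorem pv_zip_tail_gaps : ∀ (l : List Int),
    (l.zip l.tail).map (fun p => p.2 - p.1) = pvGaps l := by
  intro l
  induction l with
  | nil => simp [pvGaps]
  | cons a l ih =>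
    cases l with
    | nil => simp [pvGaps]
    | cons b r => simp only [List.tail_cons, List.zip_cons_cons, List.map_cons, pvGaps]
                  rw [← ih]; simp

-- ===== VERDICT (by name: the statement is the Claim_ definition above) =====
theorem maior_sequencia_spec : Claim_equal_maior_sequencia := by
  intro L _
  unfold Spec_maior_sequencia maior_sequencia maior_sequencia_alt
  cases L with
  | nil => decide
  | cons x xs =>
    simp only [PySem.List.slice_from_one, List.tail_cons]
    -- A side
    have hfold := pv_fold_adj
      (fun (s : Int × Int) x y =>
        if x < y then
          if s.2 + 1 > s.1 then (s.2 + 1, s.2 + 1) else (s.1, s.2 + 1)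
        else (s.1, 1))
      (x :: xs).length (x :: xs) 0 rfl ((1 : Int), (1 : Int))
    simp only [Nat.cast_zero, List.drop_zero, Nat.zero_add, List.drop_one, List.tail_cons] at hfold
    rw [hfold, pv_A_inv xs x 1 1 le_rfl le_rfl]
    -- B side
    rw [pv_breaks_eq xs x 1, pv_zip_tail_gaps]
    have hg := pv_gaps_runs xs x 0
    simp only [zero_add] at hg
    obtain ⟨h, r, hhr, hh1⟩ := pvRuns_cons x xs
    rw [hhr] at hg ⊢
    simp only [List.cons_append, List.nil_append] at hg ⊢
    rw [hg, PySem.List.max?_id_cons, Option.getD_some]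
    -- both sides are the running max of the run lengths
    simp only [pvAddFirst, List.foldl_cons]
    rw [show h + (1 - 1 : Int) = h by ring, show max 1 h = h by omega]
    have hle := (PySem.List.le_foldl_max r h).1
    omega
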